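-- pv_equiv track=rewrite | github.com/Strife-01/Advent-of-Code | Advent_Of_Code/2025/day_6/main.py | getGrandTotal
-- ===== SOURCE A (Python) =====
-- def getGrandTotal(numbers_grid, math_operations):
--     results = []
--     for i, op in enumerate(math_operations):
--         total = 0 if op == "+" else 1
--         for j in range(len(numbers_grid)):
--             if op == '+':
--                 total += numbers_grid[j][i]
--             else: # op == '*'
--                 total *= numbers_grid[j][i]
--         results.append(total)
--     return sum(results)
-- ===== SOURCE B (Python) =====
-- def getGrandTotal(numbers_grid, math_operations):
--     results = [0 if op == "+" else 1 for op in math_operations]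
--     for row in numbers_grid:
--         results = [r + row[i] if op == "+" else r * row[i]
--                    for r, (i, op) in zip(results, enumerate(math_operations))]
--     return sum(results)
-- ===== Notes on version B (the rewrite author's own statement) =====
-- stated objective: alternative
-- what changed: Replaced A's column-major nested loop (one scalar accumulator recomputed per operation, indexing grid[j][i]) with a row-major single pass that maintains a vector of running totals, folding each row elementwise into it and summing at the end.
import Mathlib
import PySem

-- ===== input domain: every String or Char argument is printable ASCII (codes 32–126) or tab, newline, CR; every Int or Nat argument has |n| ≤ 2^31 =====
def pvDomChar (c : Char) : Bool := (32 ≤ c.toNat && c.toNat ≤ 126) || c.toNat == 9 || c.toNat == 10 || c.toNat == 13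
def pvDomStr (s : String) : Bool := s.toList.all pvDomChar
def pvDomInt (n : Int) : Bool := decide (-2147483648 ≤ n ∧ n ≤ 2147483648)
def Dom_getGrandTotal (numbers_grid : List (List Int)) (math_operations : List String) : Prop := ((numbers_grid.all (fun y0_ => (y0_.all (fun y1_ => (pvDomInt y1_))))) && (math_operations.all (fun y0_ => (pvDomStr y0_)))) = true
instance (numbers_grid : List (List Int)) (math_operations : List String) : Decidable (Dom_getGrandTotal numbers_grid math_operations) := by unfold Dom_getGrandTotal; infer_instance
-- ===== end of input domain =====

-- B replaces A's column-major nested loop with a row-major single pass maintaining a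
-- vector of running totals (alternative decomposition, same asymptotic cost).

-- ===== PORT A =====
def getGrandTotal (numbers_grid : List (List Int)) (math_operations : List String) : Int :=
  let results : List Int :=
    (PySem.List.enumerate math_operations 0).foldl (fun results p =>
      let total : Int := if p.2 == "+" then 0 else 1
      let total := (PySem.List.pyRange 0 (numbers_grid.length : Int) 1).foldl
        (fun total j =>
          if p.2 == "+" then total + PySem.List.pyGetD (PySem.List.pyGetD numbers_grid j []) p.1 0
          else total * PySem.List.pyGetD (PySem.List.pyGetD numbers_grid j []) p.1 0) total
      results ++ [total]) []
  results.foldl (· + ·) 0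

-- ===== PORT B =====
def getGrandTotal_alt (numbers_grid : List (List Int)) (math_operations : List String) : Int :=
  let results : List Int := math_operations.map (fun op => if op == "+" then (0 : Int) else 1)
  let results := numbers_grid.foldl (fun results row =>
    (results.zip (PySem.List.enumerate math_operations 0)).map (fun q =>
      if q.2.2 == "+" then q.1 + PySem.List.pyGetD row q.2.1 0
      else q.1 * PySem.List.pyGetD row q.2.1 0)) results
  results.foldl (· + ·) 0

-- ===== PRECONDITION & SPEC =====
-- Pre_ excludes exactly the inputs where Python A raises IndexError: a row shorter than the
-- operation list (both Pythons raise there).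
def Pre_getGrandTotal (numbers_grid : List (List Int)) (math_operations : List String) : Prop :=
  ∀ row ∈ numbers_grid, math_operations.length ≤ row.length
instance (numbers_grid : List (List Int)) (math_operations : List String) : Decidable (Pre_getGrandTotal numbers_grid math_operations) := by unfold Pre_getGrandTotal; infer_instance
def pvWitness_getGrandTotal : List (List Int) × List String := ([[1, 2], [3, 4]], ["+", "*"])

def Spec_getGrandTotal (numbers_grid : List (List Int)) (math_operations : List String) (out : Int) : Prop := out = getGrandTotal_alt numbers_grid math_operations
instance (numbers_grid : List (List Int)) (math_operations : List String) (out : Int) : Decidable (Spec_getGrandTotal numbers_grid math_operations out) := by unfold Spec_getGrandTotal; infer_instance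

-- ===== CLAIM (what is proved, stated in full; the proofs are below) =====
def Claim_equal_getGrandTotal : Prop := ∀ (numbers_grid : List (List Int)) (math_operations : List String), Dom_getGrandTotal numbers_grid math_operations → Pre_getGrandTotal numbers_grid math_operations → Spec_getGrandTotal numbers_grid math_operations (getGrandTotal numbers_grid math_operations)

-- ===== LEMMAS AND PROOFS =====

-- One row-step of B on a vector that is a map over E equals a map of the stepped values.
theorem pv_step_map {α β : Type} (E : List α) (h : α → β) (c : α → β → β) :
    ((E.map h).zip E).map (fun q => c q.2 q.1) = E.map (fun p => c p (h p)) := by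
  induction E with
  | nil => rfl
  | cons a E ih => simp [List.zip_cons_cons, ih]

-- Loop interchange: folding rows into a vector of per-entry accumulators equals
-- computing each entry's accumulator by folding the rows independently.
theorem pv_interchange {α β : Type} (rows : List β) (E : List α) (c : α → Int → β → Int)
    (h : α → Int) :
    rows.foldl (fun rs row => (rs.zip E).map (fun q => c q.2 q.1 row)) (E.map h)
      = E.map (fun p => rows.foldl (c p) (h p)) := by
  induction rows generalizing h with
  | nil => rfl
  | cons row rows ih =>
    simp only [List.foldl_cons]
    rw [pv_step_map E h (fun p t => c p t row), ih (fun p => c p (h p) row)]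

theorem pv_main (numbers_grid : List (List Int)) (math_operations : List String) :
    getGrandTotal numbers_grid math_operations = getGrandTotal_alt numbers_grid math_operations := by
  unfold getGrandTotal getGrandTotal_alt
  simp only []
  -- A's results list: append-singleton fold is a map
  rw [PySem.List.foldl_append_singleton_eq_map]
  -- A's inner loop over range(len grid) is a fold over the rows
  have hA : ∀ p : Int × String,
      (PySem.List.pyRange 0 (numbers_grid.length : Int) 1).foldl
        (fun total j =>
          if p.2 == "+" then total + PySem.List.pyGetD (PySem.List.pyGetD numbers_grid j []) p.1 0
          else total * PySem.List.pyGetD (PySem.List.pyGetD numbers_grid j []) p.1 0)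
        (if p.2 == "+" then 0 else 1)
      = numbers_grid.foldl
          (fun total row =>
            if p.2 == "+" then total + PySem.List.pyGetD row p.1 0
            else total * PySem.List.pyGetD row p.1 0)
          (if p.2 == "+" then 0 else 1) := by
    intro p
    exact PySem.List.foldl_pyRange_zero_pyGetD numbers_grid []
      (fun total row =>
        if p.2 == "+" then total + PySem.List.pyGetD row p.1 0
        else total * PySem.List.pyGetD row p.1 0) _
  simp only [hA]
  -- B's initial vector as a map over the enumeration
  have hinit : math_operations.map (fun op => if op == "+" then (0 : Int) else 1)
      = (PySem.List.enumerate math_operations 0).map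
          (fun p => if p.2 == "+" then (0 : Int) else 1) := by
    conv_lhs => rw [← PySem.List.map_snd_enumerate math_operations 0]
    rw [List.map_map]
    rfl
  rw [hinit,
    pv_interchange numbers_grid (PySem.List.enumerate math_operations 0)
      (fun p total row =>
        if p.2 == "+" then total + PySem.List.pyGetD row p.1 0
        else total * PySem.List.pyGetD row p.1 0)
      (fun p => if p.2 == "+" then (0 : Int) else 1)]
  rw [List.nil_append]

-- ===== VERDICT (by name: the statement is the Claim_ definition above) =====
theorem getGrandTotal_spec : Claim_equal_getGrandTotal := by
  intro numbers_grid math_operations _ _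
  exact pv_main numbers_grid math_operations
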